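-- pv_equiv track=rewrite | github.com/sim-ashish/FastApi | leetcode.py | count_max_subarrays
-- ===== SOURCE A (Python) =====
-- def count_max_subarrays(nums, k):
--     from collections import deque
--
--     n = len(nums)
--     count = 0
--     maximum = max(nums)
--
--     left = 0
--     max_count = 0
--
--     for right in range(n):
--         if nums[right] == maximum:
--             max_count += 1
--
--         # Shrink window from the left if window size exceeds k
--         while right - left + 1 > k:
--             if nums[left] == maximum:
--                 max_count -= 1
--             left += 1
--
--         if right - left + 1 >= k and max_count >= k:
--             count += 1
--
--     return count
-- ===== SOURCE B (Python) =====
-- def count_max_subarrays(nums, k):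
--     m = max(nums)
--     run = 0
--     count = 0
--     for x in nums:
--         run = run + 1 if x == m else 0
--         if run >= k:
--             count += 1
--     return count
-- ===== Notes on version B (the rewrite author's own statement) =====
-- stated objective: simpler
-- what changed: Replaces the sliding-window/two-pointer scheme (left pointer, window-shrinking inner loop, in-window maximum counter) with a single pass tracking only the length of the current run of consecutive maxima, counting a position whenever the run reaches k.
import Mathlib
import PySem

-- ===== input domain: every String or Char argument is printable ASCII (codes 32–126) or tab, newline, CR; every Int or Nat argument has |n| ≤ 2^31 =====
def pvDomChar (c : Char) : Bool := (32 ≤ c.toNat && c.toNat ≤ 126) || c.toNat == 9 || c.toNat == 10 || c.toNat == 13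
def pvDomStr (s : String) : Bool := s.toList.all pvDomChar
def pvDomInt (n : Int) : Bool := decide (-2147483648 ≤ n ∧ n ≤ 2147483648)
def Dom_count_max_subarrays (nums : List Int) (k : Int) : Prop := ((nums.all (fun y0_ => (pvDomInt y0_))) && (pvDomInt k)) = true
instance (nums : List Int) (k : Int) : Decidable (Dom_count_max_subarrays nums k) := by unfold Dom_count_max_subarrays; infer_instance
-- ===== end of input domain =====

-- B replaces A's sliding-window (left pointer + in-window maximum counter) by a single pass
-- tracking the length of the current run of consecutive maxima — simpler, same O(n) cost.

-- ===== PORT A =====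
-- the inner `while right - left + 1 > k:` loop; the `left < nums.length` guard marks where
-- Python's `nums[left]` would raise IndexError (only reachable for k < 0, outside Pre_)
def pvShrinkA (nums : List Int) (maximum k right : Int) (left max_count : Int) : Int × Int :=
  if h : right - left + 1 > k ∧ left < (nums.length : Int) then
    let mc := if PySem.List.pyGetD nums left 0 = maximum then max_count - 1 else max_count
    pvShrinkA nums maximum k right (left + 1) mc
  else (left, max_count)
termination_by ((nums.length : Int) - left).toNat
decreasing_by omega

def count_max_subarrays (nums : List Int) (k : Int) : Int :=
  let n : Int := nums.length
  let maximum : Int := (PySem.List.max? nums (fun y => y)).getD 0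
  let s := (PySem.List.pyRange 0 n 1).foldl
    (fun (s : Int × Int × Int) right =>
      let max_count := if PySem.List.pyGetD nums right 0 = maximum then s.2.2 + 1 else s.2.2
      let p := pvShrinkA nums maximum k right s.2.1 max_count
      let count := if right - p.1 + 1 ≥ k ∧ p.2 ≥ k then s.1 + 1 else s.1
      (count, p.1, p.2))
    (0, 0, 0)
  s.1

-- ===== PORT B =====
def count_max_subarrays_alt (nums : List Int) (k : Int) : Int :=
  let m : Int := (PySem.List.max? nums (fun y => y)).getD 0
  let s := nums.foldl
    (fun (s : Int × Int) x =>
      let run := if x = m then s.2 + 1 else 0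
      (if run ≥ k then s.1 + 1 else s.1, run))
    ((0 : Int), (0 : Int))
  s.1

-- ===== PRECONDITION & SPEC =====
-- Pre_ excludes exactly where Python A raises: max([]) is a ValueError on the empty list, and
-- for k < 0 the shrink loop walks `left` past the end and nums[left] raises IndexError.
def Pre_count_max_subarrays (nums : List Int) (k : Int) : Prop := nums ≠ [] ∧ 0 ≤ k
instance (nums : List Int) (k : Int) : Decidable (Pre_count_max_subarrays nums k) := by unfold Pre_count_max_subarrays; infer_instance

def pvWitness_count_max_subarrays : List Int × Int := ([3, 1, 3, 3], 2)

def Spec_count_max_subarrays (nums : List Int) (k : Int) (out : Int) : Prop := out = count_max_subarrays_alt nums k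
instance (nums : List Int) (k : Int) (out : Int) : Decidable (Spec_count_max_subarrays nums k out) := by unfold Spec_count_max_subarrays; infer_instance

-- ===== CLAIM (what is proved, stated in full; the proofs are below) =====
def Claim_equal_count_max_subarrays : Prop := ∀ (nums : List Int) (k : Int), Dom_count_max_subarrays nums k → Pre_count_max_subarrays nums k → Spec_count_max_subarrays nums k (count_max_subarrays nums k)

-- ===== LEMMAS AND PROOFS =====

def pvStepB (m k : Int) (s : Int × Int) (x : Int) : Int × Int :=
  let run := if x = m then s.2 + 1 else 0
  (if run ≥ k then s.1 + 1 else s.1, run)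
def pvBState (m k : Int) (p : List Int) : Int × Int := p.foldl (pvStepB m k) (0, 0)
def pvStepA (nums : List Int) (maximum k : Int) (s : Int × Int × Int) (right : Int) : Int × Int × Int :=
  let max_count := if PySem.List.pyGetD nums right 0 = maximum then s.2.2 + 1 else s.2.2
  let p := pvShrinkA nums maximum k right s.2.1 max_count
  let count := if right - p.1 + 1 ≥ k ∧ p.2 ≥ k then s.1 + 1 else s.1
  (count, p.1, p.2)

lemma pvBState_append (m k : Int) (p : List Int) (x : Int) :
    pvBState m k (p ++ [x]) = pvStepB m k (pvBState m k p) x := by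
  simp [pvBState, List.foldl_append]

lemma pvBState_run (m k : Int) (p : List Int) :
    (pvBState m k p).2 = ((p.reverse.takeWhile (· == m)).length : Int) := by
  induction p using List.reverseRecOn with
  | nil => simp [pvBState]
  | append_singleton p x ih =>
      rw [pvBState_append]
      by_cases h : x = m <;> simp [pvStepB, h, ih]

lemma pvTakeWhileGe {α : Type} (q : α → Bool) :
    ∀ (j : Nat) (l : List α), j ≤ (l.takeWhile q).length ↔ j ≤ l.length ∧ ∀ x ∈ l.take j, q x := by
  intro j
  induction j with
  | zero => simp
  | succ j ih =>
      intro l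
      cases l with
      | nil => simp
      | cons a l => by_cases h : q a <;> simp [h, ih]

lemma pvKey' (m k : Int) (hk : 0 ≤ k) (p : List Int) :
    ((p.length : Int) - max 0 ((p.length : Int) - k) ≥ k ∧
     ((p.drop (max 0 ((p.length : Int) - k)).toNat).count m : Int) ≥ k)
    ↔ ((p.reverse.takeWhile (· == m)).length : Int) ≥ k := by
  by_cases ht : k ≤ (p.length : Int)
  · have hmax : (max 0 ((p.length : Int) - k)).toNat = p.length - k.toNat := by omega
    have hc1 : (p.length : Int) - max 0 ((p.length : Int) - k) ≥ k := by omega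
    rw [hmax]
    set w := p.drop (p.length - k.toNat) with hw
    have hwlen : w.length = k.toNat := by simp [hw]; omega
    have hcount : ((w.count m : Int) ≥ k) ↔ ∀ b ∈ w, m = b := by
      rw [← List.count_eq_length]
      have := List.count_le_length (a := m) (l := w)
      omega
    have hrun : (((p.reverse.takeWhile (· == m)).length : Int) ≥ k) ↔
        k.toNat ≤ (p.reverse.takeWhile (· == m)).length := by omega
    rw [hrun, pvTakeWhileGe]
    simp only [List.length_reverse]
    have htr : p.reverse.take k.toNat = w.reverse := by
      rw [List.take_reverse, hw]
    simp only [htr, List.mem_reverse, beq_iff_eq]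
    constructor
    · rintro ⟨-, h⟩
      exact ⟨by omega, fun x hx => (hcount.mp h x hx).symm⟩
    · rintro ⟨-, h⟩
      exact ⟨hc1, hcount.mpr fun b hb => (h b hb).symm⟩
  · have h2 : (p.reverse.takeWhile (· == m)).length ≤ p.length := by
      calc (p.reverse.takeWhile (· == m)).length ≤ p.reverse.length :=
            (List.takeWhile_sublist _).length_le
        _ = p.length := List.length_reverse
    constructor
    · rintro ⟨h1, -⟩; omega
    · intro h; omega

lemma pvShrinkA_stop (nums : List Int) (m k right left mc : Int)
    (h : ¬ (right - left + 1 > k ∧ left < (nums.length : Int))) :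
    pvShrinkA nums m k right left mc = (left, mc) := by
  rw [pvShrinkA, dif_neg h]

lemma pvShrinkA_step (nums : List Int) (m k right left mc : Int)
    (h : right - left + 1 > k ∧ left < (nums.length : Int)) :
    pvShrinkA nums m k right left mc =
      pvShrinkA nums m k right (left + 1)
        (if PySem.List.pyGetD nums left 0 = m then mc - 1 else mc) := by
  rw [pvShrinkA, dif_pos h]

lemma pvCountSnoc (m x : Int) (p : List Int) (j : Nat) (hj : j ≤ p.length) :
    (((p ++ [x]).drop j).count m : Int) = ((p.drop j).count m : Int) + (if x = m then 1 else 0) := by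
  rw [List.drop_append_of_le_length hj]
  by_cases h : x = m <;> simp [List.count_append, h]

lemma pvCountPop (m : Int) (q : List Int) (j : Nat) (hj : j < q.length) :
    ((q.drop j).count m : Int) = (if q[j]'hj = m then 1 else 0) + ((q.drop (j + 1)).count m : Int) := by
  rw [List.drop_eq_getElem_cons hj, List.count_cons]
  by_cases h : q[j]'hj = m
  · simp [h]; omega
  · simp [h]

lemma pvLoopInv (nums : List Int) (m k : Int) (hk : 0 ≤ k) :
    ∀ (r : Nat), r ≤ nums.length →
    (PySem.List.pyRange 0 (r : Int) 1).foldl (pvStepA nums m k) (0, 0, 0) =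
      ((pvBState m k (nums.take r)).1,
       max 0 ((r : Int) - k),
       (((nums.take r).drop (max 0 ((r : Int) - k)).toNat).count m : Int)) := by
  intro r
  induction r with
  | zero =>
      intro _
      rw [PySem.List.pyRange_one_eq_nil (by omega)]
      simp [pvBState]
      omega
  | succ r ih =>
      intro hr
      have hrl : r < nums.length := by omega
      have hcast : ((r + 1 : Nat) : Int) = (r : Int) + 1 := by push_cast; ring
      rw [hcast, PySem.List.pyRange_one_succ_right (by positivity), List.foldl_append,
        ih (by omega)]
      -- abbreviations
      have hx : PySem.List.pyGetD nums (r : Int) 0 = nums[r] := by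
        rw [PySem.List.pyGetD_natCast, List.getD_eq_getElem nums 0 hrl]
      have htake : nums.take (r + 1) = nums.take r ++ [nums[r]] := by
        rw [List.take_add_one, List.getElem?_eq_getElem hrl]; rfl
      have hlen1 : ((nums.take (r + 1)).length : Int) = (r : Int) + 1 := by
        simp [List.length_take]; omega
      -- the B-side new state
      have hB : pvBState m k (nums.take (r + 1)) =
          (if (pvBState m k (nums.take (r + 1))).2 ≥ k
             then (pvBState m k (nums.take r)).1 + 1 else (pvBState m k (nums.take r)).1,
           (pvBState m k (nums.take (r + 1))).2) := by
        rw [htake, pvBState_append]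
        simp [pvStepB]
      -- the run component of B agrees with A's counting condition (pvKey')
      have hkey : (((r : Int) + 1) - max 0 (((r : Int) + 1) - k) ≥ k ∧
            (((nums.take (r + 1)).drop (max 0 (((r : Int) + 1) - k)).toNat).count m : Int) ≥ k)
          ↔ (pvBState m k (nums.take (r + 1))).2 ≥ k := by
        rw [pvBState_run, ← hlen1]
        exact pvKey' m k hk (nums.take (r + 1))
      by_cases hkr : k ≤ (r : Int)
      · -- k ≤ r : the shrink loop runs exactly once
        have hL : max 0 ((r : Int) - k) = (r : Int) - k := by omega
        have hL' : max 0 (((r : Int) + 1) - k) = (r : Int) - k + 1 := by omega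
        have hj : ((r : Int) - k).toNat = r - k.toNat := by omega
        have hT : ((r : Int) - k + 1).toNat = r - k.toNat + 1 := by omega
        have hjlt : r - k.toNat < (nums.take (r + 1)).length := by
          simp [List.length_take]; omega
        have hgq : (nums.take (r + 1))[r - k.toNat]'hjlt = nums[r - k.toNat]'(by omega) :=
          List.getElem_take
        have hget : PySem.List.pyGetD nums ((r : Int) - k) 0 = nums[r - k.toNat]'(by omega) := by
          rw [PySem.List.pyGetD_of_nonneg nums 0 (by omega), hj,
            List.getD_eq_getElem nums 0 (by omega)]
        have hstep1 : (((nums.take (r + 1)).drop (r - k.toNat)).count m : Int) =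
            (((nums.take r).drop (r - k.toNat)).count m : Int) +
              (if nums[r] = m then 1 else 0) := by
          rw [htake, pvCountSnoc m _ _ _ (by simp [List.length_take]; omega)]
        have hstep2 : (((nums.take (r + 1)).drop (r - k.toNat)).count m : Int) =
            (if nums[r - k.toNat]'(by omega) = m then 1 else 0) +
              (((nums.take (r + 1)).drop (r - k.toNat + 1)).count m : Int) := by
          rw [pvCountPop m _ _ hjlt, hgq]
        have hmc2 :
            (if nums[r - k.toNat]'(by omega) = m then
               (if nums[r] = m
                  then (((nums.take r).drop (r - k.toNat)).count m : Int) + 1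
                  else (((nums.take r).drop (r - k.toNat)).count m : Int)) - 1
             else
               (if nums[r] = m
                  then (((nums.take r).drop (r - k.toNat)).count m : Int) + 1
                  else (((nums.take r).drop (r - k.toNat)).count m : Int))) =
            (((nums.take (r + 1)).drop (r - k.toNat + 1)).count m : Int) := by
          by_cases h1 : nums[r - k.toNat]'(by omega) = m <;> by_cases h2 : nums[r] = m <;>
            simp only [h1, h2, if_pos, if_neg, not_false_iff] <;>
            simp [h1, h2] at hstep1 hstep2 ⊢ <;> omega
        have hB1 := congrArg Prod.fst hB
        dsimp only at hB1
        simp only [List.foldl_cons, List.foldl_nil, pvStepA, hx, hL]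
        rw [pvShrinkA_step _ _ _ _ _ _ ⟨by omega, by omega⟩, hget,
          pvShrinkA_stop _ _ _ _ _ _ (by omega)]
        dsimp only
        rw [hj, hmc2, hL', hT, hB1]
        rw [hL', hT] at hkey
        have hcond : ((r : Int) - ((r : Int) - k + 1) + 1 ≥ k ∧
              (((nums.take (r + 1)).drop (r - k.toNat + 1)).count m : Int) ≥ k)
            ↔ (pvBState m k (nums.take (r + 1))).2 ≥ k := by
          constructor
          · rintro ⟨h1, h2⟩; exact hkey.mp ⟨by omega, h2⟩
          · intro h
            obtain ⟨h1, h2⟩ := hkey.mpr h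
            exact ⟨by omega, h2⟩
        simp only [hcond]
      · -- r < k (keep) : the shrink loop does not run
        have hL : max 0 ((r : Int) - k) = 0 := by omega
        have hL' : max 0 (((r : Int) + 1) - k) = 0 := by omega
        have hstep1 : (((nums.take (r + 1)).drop 0).count m : Int) =
            (((nums.take r).drop 0).count m : Int) + (if nums[r] = m then 1 else 0) := by
          rw [htake, pvCountSnoc m _ _ _ (by omega)]
        have hmc1 :
            (if nums[r] = m
               then (((nums.take r).drop 0).count m : Int) + 1
               else (((nums.take r).drop 0).count m : Int)) =
            (((nums.take (r + 1)).drop 0).count m : Int) := by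
          by_cases h2 : nums[r] = m <;> simp [h2] at hstep1 ⊢ <;> omega
        have hB1 := congrArg Prod.fst hB
        dsimp only at hB1
        simp only [List.foldl_cons, List.foldl_nil, pvStepA, hx, hL]
        rw [pvShrinkA_stop _ _ _ _ _ _ (by omega)]
        dsimp only
        simp only [Int.toNat_zero, List.drop_zero] at hmc1 ⊢
        rw [hmc1, hL', hB1]
        simp only [Int.toNat_zero, List.drop_zero] at hkey ⊢
        rw [hL'] at hkey
        simp only [Int.toNat_zero, List.drop_zero] at hkey
        have hcond : ((r : Int) - 0 + 1 ≥ k ∧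
              ((nums.take (r + 1)).count m : Int) ≥ k)
            ↔ (pvBState m k (nums.take (r + 1))).2 ≥ k := by
          constructor
          · rintro ⟨h1, h2⟩; exact hkey.mp ⟨by omega, h2⟩
          · intro h
            obtain ⟨h1, h2⟩ := hkey.mpr h
            exact ⟨by omega, h2⟩
        simp only [hcond]

-- ===== VERDICT (by name: the statement is the Claim_ definition above) =====
theorem count_max_subarrays_spec : Claim_equal_count_max_subarrays := by
  intro nums k _ hpre
  unfold Spec_count_max_subarrays
  have hA : count_max_subarrays nums k =
      ((PySem.List.pyRange 0 (nums.length : Int) 1).foldl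
        (pvStepA nums ((PySem.List.max? nums (fun y => y)).getD 0) k) (0, 0, 0)).1 := rfl
  have hBdef : count_max_subarrays_alt nums k =
      (pvBState ((PySem.List.max? nums (fun y => y)).getD 0) k nums).1 := rfl
  rw [hA, hBdef, pvLoopInv nums _ k hpre.2 nums.length le_rfl, List.take_length]
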